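-- pv_equiv track=rewrite | github.com/Abhi-she-k/PythonProblems | labs109Solutions.py | stepping_stones
-- ===== SOURCE A (Python) =====
-- def stepping_stones(n, ones):
--     # Initialize board with stones
--     board = {}  # (row, col) -> stone number
--     possiblePlacements = set()
--
--     def get_neighbors(r, c):
--         """Get all valid neighbors of a position"""
--         neighbors = []
--         for dr in [-1, 0, 1]:
--             for dc in [-1, 0, 1]:
--                 if dr == 0 and dc == 0:
--                     continue
--                 nr, nc = r + dr, c + dc
--                 if 0 <= nr < n and 0 <= nc < n:
--                     neighbors.append((nr, nc))
--         return neighbors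
--
--
--     # Apart of FIX 1: Where we build the original possible placements set.
--     for pos in ones:
--         board[pos] = 1
--         for neighbor in get_neighbors(pos[0], pos[1]):
--             if neighbor not in board:
--                 possiblePlacements.add(neighbor)
--
--     def get_sum(r, c):
--         """Get sum of neighboring stones"""
--         total = 0
--         for neighbor in get_neighbors(r, c):
--             if neighbor in board:
--                 total += board[neighbor]
--         return total
--
--     def backtrack(k):
--         """Try to place stone k and continue"""
--         best = k - 1  # Best we've achieved so far
--
--         # Try each empty position
--
--         # FIX 1: In the original implementation we would loop through the entire board to find the empty positions,
--         # but this is inefficient. As when we start on a select few positions can be used to place a stone, looping through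
--         # the entire board would be a waste, instead of looping O(n^2) at every recursive call, we can just loop through the
--         # possible placements which would be smaller than (nxn), would be more like O(k), where k is the number of stones to place.
--         for r, c in list(possiblePlacements):
--             if (r, c) in board:
--                 continue
--
--             # Check if sum of neighbors equals k
--             if get_sum(r, c) == k:
--                 # Place stone k here
--                 board[(r, c)] = k
--                 possiblePlacements.remove((r, c))
--
--                 added_neighbors = []
--                 for neighbor in get_neighbors(r, c):
--                     if neighbor not in board and neighbor not in possiblePlacements:
--                         possiblePlacements.add(neighbor)
--                         added_neighbors.append(neighbor)
--
--                 # Try to continue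
--                 result = backtrack(k + 1)
--                 best = max(best, result)
--
--                 # Backtrack
--                 del board[(r, c)]
--
--                 for neighbor in added_neighbors:
--                     possiblePlacements.remove(neighbor)
--
--                 possiblePlacements.add((r, c))
--
--         return best
--
--     return backtrack(2)
-- ===== SOURCE B (Python) =====
-- def stepping_stones(n, ones):
--     # Same DFS search, but purely functional: each recursive call gets a fresh
--     # copy of the board with the new stone added, and the candidate cells are
--     # recomputed each call by scanning the empty neighbors of the placed stones,
--     # so there is no shared-state bookkeeping and no undo/rollback logic.
--
--     def neighbors(r, c):
--         return [(r + dr, c + dc) for dr in (-1, 0, 1) for dc in (-1, 0, 1)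
--                 if not (dr == 0 and dc == 0)
--                 and 0 <= r + dr < n and 0 <= c + dc < n]
--
--     def frontier(board):
--         cells = set()
--         for pos in board:
--             for nb in neighbors(pos[0], pos[1]):
--                 if nb not in board:
--                     cells.add(nb)
--         return cells
--
--     def backtrack(board, k):
--         best = k - 1
--         for cell in frontier(board):
--             if sum(board.get(nb, 0) for nb in neighbors(cell[0], cell[1])) == k:
--                 new_board = dict(board)
--                 new_board[cell] = k
--                 best = max(best, backtrack(new_board, k + 1))
--         return best
--
--     board = {}
--     for pos in ones:
--         board[pos] = 1
--     return backtrack(board, 2)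
-- ===== Notes on version B (the rewrite author's own statement) =====
-- stated objective: simpler
-- what changed: Replaced the mutate-and-undo DFS (shared board dict plus an incrementally maintained possiblePlacements set with explicit rollback of every add/remove) by a purely functional DFS: each recursive call receives a fresh copy of the board and recomputes the candidate frontier by scanning empty neighbors of the placed stones, removing all backtracking/bookkeeping logic.
import Mathlib
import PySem

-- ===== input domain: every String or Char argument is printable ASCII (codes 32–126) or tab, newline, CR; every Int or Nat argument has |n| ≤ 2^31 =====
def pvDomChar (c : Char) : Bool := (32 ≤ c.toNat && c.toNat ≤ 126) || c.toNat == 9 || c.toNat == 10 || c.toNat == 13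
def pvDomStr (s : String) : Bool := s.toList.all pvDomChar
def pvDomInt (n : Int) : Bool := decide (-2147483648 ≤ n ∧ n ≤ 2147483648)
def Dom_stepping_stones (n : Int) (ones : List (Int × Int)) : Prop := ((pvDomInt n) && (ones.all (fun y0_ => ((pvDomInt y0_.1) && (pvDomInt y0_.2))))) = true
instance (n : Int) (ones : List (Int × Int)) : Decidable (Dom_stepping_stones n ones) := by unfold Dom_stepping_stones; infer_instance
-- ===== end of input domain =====

-- B replaces A's mutate-and-undo DFS (shared board + maintained possiblePlacements set
-- with explicit rollback) by a purely functional DFS on a fresh board copy per call,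
-- recomputing the candidate frontier each call (objective: simpler — no undo logic).
-- The returned value of each backtrack call is a max over branches, hence independent of
-- the (unmodelled) hash iteration order of the Python sets both versions loop over.

-- ===== PORT A =====
-- get_neighbors(r, c)
def pvNeighborsA (n r c : Int) : List (Int × Int) :=
  ([-1, 0, 1] : List Int).foldl (fun acc dr =>
    ([-1, 0, 1] : List Int).foldl (fun acc dc =>
      if dr = 0 ∧ dc = 0 then acc
      else if 0 ≤ r + dr ∧ r + dr < n ∧ 0 ≤ c + dc ∧ c + dc < n then
        acc ++ [(r + dr, c + dc)]
      else acc) acc) []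

-- get_sum(r, c)
def pvGetSumA (n : Int) (board : PySem.Dict (Int × Int) Int) (r c : Int) : Int :=
  (pvNeighborsA n r c).foldl (fun total nb =>
    if board.contains nb then total + board.getD nb 0 else total) 0

-- backtrack(k).  fuel bounds the recursion depth; each recursive call places a stone on
-- an empty in-bounds cell, so the depth never exceeds n² and the fuel supplied by the
-- top level (n²+1) is never exhausted.
-- `for r, c in list(possiblePlacements)` iterates a snapshot of the set while the body
-- mutates it: the fold threads (best, possiblePlacements) through the snapshot.
-- `board` is restored EXACTLY by `del board[(r, c)]` (the key was fresh), so the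
-- unchanged `board` is reused for the remaining iterations.
def pvBacktrackA : Nat → Int → PySem.Dict (Int × Int) Int → PySem.Set (Int × Int) → Int → Int
  | 0, _, _, _, k => k - 1
  | fuel + 1, n, board, pps, k =>
    (pps.foldl (fun (st : Int × PySem.Set (Int × Int)) cell =>
        if board.contains cell then st
        else if pvGetSumA n board cell.1 cell.2 = k then
          let board' := board.insert cell k
          -- possiblePlacements.remove((r, c)): the cell is always present (it came from
          -- the snapshot and membership is restored after every iteration), so Python's
          -- set.remove never raises here and equals discard.
          let qa := (pvNeighborsA n cell.1 cell.2).foldl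
            (fun (q : PySem.Set (Int × Int) × List (Int × Int)) nb =>
              if ¬ board'.contains nb ∧ ¬ q.1.contains nb then
                (PySem.Set.add q.1 nb, q.2 ++ [nb])
              else q) (PySem.Set.discard st.2 cell, [])
          let result := pvBacktrackA fuel n board' qa.1 (k + 1)
          (max st.1 result, PySem.Set.add (qa.2.foldl PySem.Set.discard qa.1) cell)
        else st) ((k - 1 : Int), pps)).1

def stepping_stones (n : Int) (ones : List (Int × Int)) : Int :=
  let init := ones.foldl
    (fun (st : PySem.Dict (Int × Int) Int × PySem.Set (Int × Int)) pos =>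
      let board := st.1.insert pos 1
      (board, (pvNeighborsA n pos.1 pos.2).foldl (fun s nb =>
          if board.contains nb then s else PySem.Set.add s nb) st.2))
    (PySem.Dict.empty, PySem.Set.empty)
  pvBacktrackA (n.toNat * n.toNat + 1) n init.1 init.2 2

-- ===== PORT B =====
-- neighbors(r, c): a list comprehension (flatMap over dr, filtered appends over dc)
def pvNeighborsB (n r c : Int) : List (Int × Int) :=
  ([-1, 0, 1] : List Int).flatMap (fun dr =>
    ([-1, 0, 1] : List Int).foldl (fun acc dc =>
      if ¬ (dr = 0 ∧ dc = 0) ∧ 0 ≤ r + dr ∧ r + dr < n ∧ 0 ≤ c + dc ∧ c + dc < n then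
        acc ++ [(r + dr, c + dc)]
      else acc) [])

-- frontier(board): empty neighbors of the placed stones, recomputed from scratch
def pvFrontierB (n : Int) (board : PySem.Dict (Int × Int) Int) : PySem.Set (Int × Int) :=
  board.keys.foldl (fun cells pos =>
    (pvNeighborsB n pos.1 pos.2).foldl (fun cells nb =>
      if board.contains nb then cells else PySem.Set.add cells nb) cells)
    PySem.Set.empty

-- backtrack(board, k): recursion on a fresh board copy (board.insert), no undo.
-- fuel as in port A (same expression at the top level).
def pvBacktrackB : Nat → Int → PySem.Dict (Int × Int) Int → Int → Int
  | 0, _, _, k => k - 1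
  | fuel + 1, n, board, k =>
    (pvFrontierB n board).foldl (fun best cell =>
      if (pvNeighborsB n cell.1 cell.2).foldl (fun t nb => t + board.getD nb 0) 0 = k then
        max best (pvBacktrackB fuel n (board.insert cell k) (k + 1))
      else best) (k - 1)

def stepping_stones_alt (n : Int) (ones : List (Int × Int)) : Int :=
  pvBacktrackB (n.toNat * n.toNat + 1) n
    (ones.foldl (fun d pos => d.insert pos 1) PySem.Dict.empty) 2

-- ===== PRECONDITION & SPEC =====
def Spec_stepping_stones (n : Int) (ones : List (Int × Int)) (out : Int) : Prop := out = stepping_stones_alt n ones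
instance (n : Int) (ones : List (Int × Int)) (out : Int) : Decidable (Spec_stepping_stones n ones out) := by unfold Spec_stepping_stones; infer_instance

-- ===== CLAIM (what is proved, stated in full; the proofs are below) =====
def Claim_equal_stepping_stones : Prop := ∀ (n : Int) (ones : List (Int × Int)), Dom_stepping_stones n ones → Spec_stepping_stones n ones (stepping_stones n ones)

-- ===== LEMMAS AND PROOFS =====

-- the inner dc-fold of A's get_neighbors from any accumulator is the accumulator
-- followed by B's comprehension block for that dr
set_option maxHeartbeats 1000000 in
lemma pvInner_shift (n r c dr : Int) (acc : List (Int × Int)) :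
    ([-1, 0, 1] : List Int).foldl (fun acc dc =>
      if dr = 0 ∧ dc = 0 then acc
      else if 0 ≤ r + dr ∧ r + dr < n ∧ 0 ≤ c + dc ∧ c + dc < n then
        acc ++ [(r + dr, c + dc)]
      else acc) acc
    = acc ++ ([-1, 0, 1] : List Int).foldl (fun acc dc =>
      if ¬ (dr = 0 ∧ dc = 0) ∧ 0 ≤ r + dr ∧ r + dr < n ∧ 0 ≤ c + dc ∧ c + dc < n then
        acc ++ [(r + dr, c + dc)]
      else acc) [] := by
  simp only [List.foldl]
  norm_num
  split_ifs <;> simp_all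

-- The two neighbor helpers produce the same list.
lemma pvNeighB_eq (n r c : Int) : pvNeighborsB n r c = pvNeighborsA n r c := by
  rw [pvNeighborsA, pvNeighborsB,
    PySem.List.foldl_congr_mem _ _
      (fun acc dr => acc ++ ([-1, 0, 1] : List Int).foldl (fun acc dc =>
        if ¬ (dr = 0 ∧ dc = 0) ∧ 0 ≤ r + dr ∧ r + dr < n ∧ 0 ≤ c + dc ∧ c + dc < n then
          acc ++ [(r + dr, c + dc)]
        else acc) []) _
      (fun acc dr _ => pvInner_shift n r c dr acc),
    PySem.List.foldl_append_eq_flatMap, List.nil_append]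

-- membership / nodup of the shared "add the empty neighbors" fold shape
lemma pvMem_addFold (board : PySem.Dict (Int × Int) Int) (l : List (Int × Int)) :
    ∀ (s : PySem.Set (Int × Int)) (x : Int × Int),
    (x ∈ l.foldl (fun cells nb =>
        if board.contains nb then cells else PySem.Set.add cells nb) s)
      ↔ x ∈ s ∨ (x ∈ l ∧ board.contains x = false) := by
  induction l with
  | nil => simp
  | cons hd tl ih =>
    intro s x
    simp only [List.foldl_cons]
    by_cases h : board.contains hd = true
    · simp only [h, if_pos]
      rw [ih]
      constructor
      · rintro (hx | hx)
        · exact Or.inl hx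
        · exact Or.inr ⟨List.mem_cons_of_mem _ hx.1, hx.2⟩
      · rintro (hx | ⟨hx1, hx2⟩)
        · exact Or.inl hx
        · rcases List.mem_cons.1 hx1 with rfl | hx1
          · simp [h] at hx2
          · exact Or.inr ⟨hx1, hx2⟩
    · simp only [h, if_neg, Bool.not_eq_true]
      rw [ih, PySem.Set.mem_add]
      simp only [Bool.not_eq_true] at h
      constructor
      · rintro ((hx | rfl) | hx)
        · exact Or.inl hx
        · exact Or.inr ⟨List.mem_cons_self, h⟩
        · exact Or.inr ⟨List.mem_cons_of_mem _ hx.1, hx.2⟩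
      · rintro (hx | ⟨hx1, hx2⟩)
        · exact Or.inl (Or.inl hx)
        · rcases List.mem_cons.1 hx1 with rfl | hx1
          · exact Or.inl (Or.inr rfl)
          · exact Or.inr ⟨hx1, hx2⟩

lemma pvNodup_addFold (board : PySem.Dict (Int × Int) Int) (l : List (Int × Int)) :
    ∀ (s : PySem.Set (Int × Int)), s.Nodup →
    (l.foldl (fun cells nb =>
        if board.contains nb then cells else PySem.Set.add cells nb) s).Nodup := by
  induction l with
  | nil => intro s h; simpa using h
  | cons hd tl ih =>
    intro s h
    simp only [List.foldl_cons]
    by_cases hc : board.contains hd = true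
    · simp only [hc, if_pos]; exact ih _ h
    · simp only [hc, if_neg, Bool.not_eq_true]
      exact ih _ (PySem.Set.nodup_add _ _ h)

-- characterisation of B's frontier
lemma pvMem_frontierB (n : Int) (board : PySem.Dict (Int × Int) Int) (x : Int × Int) :
    x ∈ pvFrontierB n board
      ↔ board.contains x = false ∧ ∃ p ∈ board.keys, x ∈ pvNeighborsA n p.1 p.2 := by
  unfold pvFrontierB
  have main : ∀ (ps : List (Int × Int)) (s : PySem.Set (Int × Int)),
      (x ∈ ps.foldl (fun cells pos =>
        (pvNeighborsB n pos.1 pos.2).foldl (fun cells nb =>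
          if board.contains nb then cells else PySem.Set.add cells nb) cells) s)
      ↔ x ∈ s ∨ (board.contains x = false ∧ ∃ p ∈ ps, x ∈ pvNeighborsA n p.1 p.2) := by
    intro ps
    induction ps with
    | nil => simp
    | cons hd tl ih =>
      intro s
      rw [List.foldl_cons, ih, pvMem_addFold]
      simp only [pvNeighB_eq, List.mem_cons]
      constructor
      · rintro ((hx | ⟨h1, h2⟩) | ⟨h2, p, hp, hpn⟩)
        · exact Or.inl hx
        · exact Or.inr ⟨h2, hd, Or.inl rfl, h1⟩
        · exact Or.inr ⟨h2, p, Or.inr hp, hpn⟩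
      · rintro (hx | ⟨h2, p, (rfl | hp), hpn⟩)
        · exact Or.inl (Or.inl hx)
        · exact Or.inl (Or.inr ⟨hpn, h2⟩)
        · exact Or.inr ⟨h2, p, hp, hpn⟩
  rw [main]
  simp [PySem.Set.empty]

lemma pvNodup_frontierB (n : Int) (board : PySem.Dict (Int × Int) Int) :
    (pvFrontierB n board).Nodup := by
  unfold pvFrontierB
  have main : ∀ (ps : List (Int × Int)) (s : PySem.Set (Int × Int)), s.Nodup →
      (ps.foldl (fun cells pos =>
        (pvNeighborsB n pos.1 pos.2).foldl (fun cells nb =>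
          if board.contains nb then cells else PySem.Set.add cells nb) cells) s).Nodup := by
    intro ps
    induction ps with
    | nil => intro s h; simpa using h
    | cons hd tl ih => intro s h; exact ih _ (pvNodup_addFold _ _ _ h)
  exact main _ _ List.nodup_nil

-- A's get_sum equals B's inline neighbor sum
lemma pvGetSum_eq (n : Int) (board : PySem.Dict (Int × Int) Int) (r c : Int) :
    pvGetSumA n board r c
      = (pvNeighborsB n r c).foldl (fun t nb => t + board.getD nb 0) 0 := by
  unfold pvGetSumA
  rw [pvNeighB_eq]
  apply PySem.List.foldl_congr_mem
  intro acc x _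
  by_cases h : board.contains x = true
  · simp [h]
  · simp only [Bool.not_eq_true] at h
    simp [h, PySem.Dict.getD_of_not_contains _ _ h]

-- A's "collect added neighbors" pair fold appends one block t to both components
lemma pvAddedFold_spec (board' : PySem.Dict (Int × Int) Int) (l : List (Int × Int)) :
    ∀ (s : PySem.Set (Int × Int)) (a : List (Int × Int)), s.Nodup →
    ∃ t, l.foldl (fun (q : PySem.Set (Int × Int) × List (Int × Int)) nb =>
          if ¬ board'.contains nb ∧ ¬ q.1.contains nb then
            (PySem.Set.add q.1 nb, q.2 ++ [nb])
          else q) (s, a) = (s ++ t, a ++ t)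
      ∧ (s ++ t).Nodup
      ∧ (∀ x ∈ t, x ∈ l ∧ board'.contains x = false)
      ∧ (∀ x ∈ l, board'.contains x = false → x ∈ s ∨ x ∈ t) := by
  induction l with
  | nil =>
    intro s a h
    exact ⟨[], by simp, by simpa using h, by simp, by simp⟩
  | cons hd tl ih =>
    intro s a h
    simp only [List.foldl_cons]
    by_cases hb : board'.contains hd = true
    · -- hd occupied: skipped
      rw [if_neg (fun hcnd => hcnd.1 hb)]
      obtain ⟨t, heq, hnd, htl, hcov⟩ := ih s a h
      refine ⟨t, heq, hnd, ?_, ?_⟩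
      · intro x hx
        exact ⟨List.mem_cons_of_mem _ (htl x hx).1, (htl x hx).2⟩
      · intro x hx hbx
        rcases List.mem_cons.1 hx with rfl | hx
        · rw [hb] at hbx; cases hbx
        · exact hcov x hx hbx
    · simp only [Bool.not_eq_true] at hb
      by_cases hm : hd ∈ s
      · -- already a candidate: skipped
        rw [if_neg (fun hcnd => hcnd.2 ((PySem.Set.contains_iff s hd).2 hm))]
        obtain ⟨t, heq, hnd, htl, hcov⟩ := ih s a h
        refine ⟨t, heq, hnd, ?_, ?_⟩
        · intro x hx
          exact ⟨List.mem_cons_of_mem _ (htl x hx).1, (htl x hx).2⟩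
        · intro x hx hbx
          rcases List.mem_cons.1 hx with rfl | hx
          · exact Or.inl hm
          · exact hcov x hx hbx
      · -- genuinely new: added to both components
        rw [if_pos ⟨by simp [hb], fun hc => hm ((PySem.Set.contains_iff s hd).1 hc)⟩]
        have hnd' : (s ++ [hd]).Nodup := by
          simp only [List.nodup_append, List.nodup_singleton]
          refine ⟨h, trivial, fun x hx b hb => ?_⟩
          simp only [List.mem_singleton] at hb
          subst hb
          exact fun he => hm (he ▸ hx)
        obtain ⟨t, heq, hnd, htl, hcov⟩ := ih (s ++ [hd]) (a ++ [hd]) hnd'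
        rw [PySem.Set.add_of_not_mem hm]
        refine ⟨hd :: t, ?_, ?_, ?_, ?_⟩
        · rw [heq]; simp
        · simpa using hnd
        · intro x hx
          rcases List.mem_cons.1 hx with rfl | hx
          · exact ⟨List.mem_cons_self, hb⟩
          · exact ⟨List.mem_cons_of_mem _ (htl x hx).1, (htl x hx).2⟩
        · intro x hx hbx
          rcases List.mem_cons.1 hx with rfl | hx
          · exact Or.inr List.mem_cons_self
          · rcases hcov x hx hbx with hs | ht
            · rcases List.mem_append.1 hs with hs | hs
              · exact Or.inl hs
              · simp only [List.mem_singleton] at hs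
                exact Or.inr (hs ▸ List.mem_cons_self)
            · exact Or.inr (List.mem_cons_of_mem _ ht)

lemma pvMem_discardFold (t : List (Int × Int)) :
    ∀ (s : PySem.Set (Int × Int)) (x : Int × Int),
      x ∈ t.foldl PySem.Set.discard s ↔ x ∈ s ∧ x ∉ t := by
  induction t with
  | nil => simp
  | cons hd tl ih =>
    intro s x
    simp only [List.foldl_cons, ih, PySem.Set.mem_discard, List.mem_cons]
    tauto

lemma pvNodup_discardFold (t : List (Int × Int)) :
    ∀ (s : PySem.Set (Int × Int)), s.Nodup → (t.foldl PySem.Set.discard s).Nodup := by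
  induction t with
  | nil => intro s h; simpa using h
  | cons hd tl ih => intro s h; exact ih _ (PySem.Set.nodup_discard _ _ h)

-- A's inner loop over a snapshot of possiblePlacements, against B's loop over the
-- snapshot restricted to empty cells
lemma pvLoop_eq (fuel : Nat) (n k : Int) (board : PySem.Dict (Int × Int) Int)
    (IH : ∀ (board' : PySem.Dict (Int × Int) Int) (pps' : PySem.Set (Int × Int)),
        pps'.Nodup → (∀ x ∈ pvFrontierB n board', x ∈ pps') →
        (∀ x ∈ pps', x ∈ pvFrontierB n board' ∨ board'.contains x = true) →
        pvBacktrackA fuel n board' pps' (k + 1) = pvBacktrackB fuel n board' (k + 1))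
    (pps0 : PySem.Set (Int × Int))
    (h0fr : ∀ x ∈ pvFrontierB n board, x ∈ pps0)
    (h0sub : ∀ x ∈ pps0, x ∈ pvFrontierB n board ∨ board.contains x = true) :
    ∀ (snap : List (Int × Int)), (∀ x ∈ snap, x ∈ pps0) →
    ∀ (pps : PySem.Set (Int × Int)) (best : Int),
      pps.Nodup → (∀ x, x ∈ pps ↔ x ∈ pps0) →
      (snap.foldl (fun (st : Int × PySem.Set (Int × Int)) cell =>
        if board.contains cell then st
        else if pvGetSumA n board cell.1 cell.2 = k then
          let board' := board.insert cell k
          let qa := (pvNeighborsA n cell.1 cell.2).foldl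
            (fun (q : PySem.Set (Int × Int) × List (Int × Int)) nb =>
              if ¬ board'.contains nb ∧ ¬ q.1.contains nb then
                (PySem.Set.add q.1 nb, q.2 ++ [nb])
              else q) (PySem.Set.discard st.2 cell, [])
          let result := pvBacktrackA fuel n board' qa.1 (k + 1)
          (max st.1 result, PySem.Set.add (qa.2.foldl PySem.Set.discard qa.1) cell)
        else st) (best, pps)).1
      = (snap.filter (fun c => !board.contains c)).foldl (fun best cell =>
          if (pvNeighborsB n cell.1 cell.2).foldl (fun t nb => t + board.getD nb 0) 0 = k then
            max best (pvBacktrackB fuel n (board.insert cell k) (k + 1))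
          else best) best := by
  intro snap
  induction snap with
  | nil => intro _ pps best _ _; simp
  | cons cell tl ihsnap =>
    intro hsnap pps best hnd hmem
    have hcell0 : cell ∈ pps0 := hsnap cell List.mem_cons_self
    have hsnap' : ∀ x ∈ tl, x ∈ pps0 := fun x hx => hsnap x (List.mem_cons_of_mem _ hx)
    rw [List.foldl_cons, List.filter_cons]
    simp only []
    by_cases hb : board.contains cell = true
    · rw [if_pos hb, if_neg (show ¬((!board.contains cell) = true) by simp [hb])]
      exact ihsnap hsnap' pps best hnd hmem
    · simp only [Bool.not_eq_true] at hb
      rw [if_neg (show ¬(board.contains cell = true) by simp [hb]),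
        if_pos (show (!board.contains cell) = true by simp [hb]),
        List.foldl_cons]
      rw [← pvGetSum_eq n board cell.1 cell.2]
      by_cases hsum : pvGetSumA n board cell.1 cell.2 = k
      · rw [if_pos hsum, if_pos hsum]
        set board' := board.insert cell k with hboard'
        obtain ⟨t, heq, hnd2, htl, hcov⟩ :=
          pvAddedFold_spec board' (pvNeighborsA n cell.1 cell.2)
            (PySem.Set.discard pps cell) [] (PySem.Set.nodup_discard _ _ hnd)
        rw [heq]
        simp only [List.nil_append]
        have hdisj : ∀ x ∈ PySem.Set.discard pps cell, x ∉ t := by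
          have hdj := List.nodup_append.1 hnd2
          intro x hx hxt
          exact hdj.2.2 x hx x hxt rfl
        -- the invariant for the recursive call
        have inv2 : ∀ x ∈ pvFrontierB n board', x ∈ PySem.Set.discard pps cell ++ t := by
          intro x hx
          rw [pvMem_frontierB] at hx
          obtain ⟨hxb, p, hpk, hpn⟩ := hx
          rcases (PySem.Dict.mem_keys_insert board cell p k).1 hpk with rfl | hpk
          · rcases hcov x hpn hxb with hx1 | hx2
            · exact List.mem_append.2 (Or.inl hx1)
            · exact List.mem_append.2 (Or.inr hx2)
          · have hxbc : (x == cell || board.contains x) = false := by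
              rw [← PySem.Dict.contains_insert board cell x k]; exact hxb
            have hxne : x ≠ cell := by
              intro hxe
              rw [hxe] at hxbc
              simp at hxbc
            have hxb0 : board.contains x = false := (Bool.or_eq_false_iff.1 hxbc).2
            have : x ∈ pps0 := h0fr x ((pvMem_frontierB n board x).2 ⟨hxb0, p, hpk, hpn⟩)
            exact List.mem_append.2 (Or.inl ((PySem.Set.mem_discard _ _ _).2
              ⟨(hmem x).2 this, hxne⟩))
        have inv3 : ∀ x ∈ PySem.Set.discard pps cell ++ t,
            x ∈ pvFrontierB n board' ∨ board'.contains x = true := by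
          intro x hx
          rcases List.mem_append.1 hx with hx | hx
          · obtain ⟨hxp, hxne⟩ := (PySem.Set.mem_discard _ _ _).1 hx
            rcases h0sub x ((hmem x).1 hxp) with hfx | hcx
            · by_cases hxb' : board'.contains x = true
              · exact Or.inr hxb'
              · simp only [Bool.not_eq_true] at hxb'
                obtain ⟨hxb0, p, hpk, hpn⟩ := (pvMem_frontierB n board x).1 hfx
                exact Or.inl ((pvMem_frontierB n board' x).2
                  ⟨hxb', p, (PySem.Dict.mem_keys_insert board cell p k).2 (Or.inr hpk), hpn⟩)
            · refine Or.inr ?_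
              rw [PySem.Dict.contains_insert board cell x k, hcx]
              simp
          · obtain ⟨hpn, hxb⟩ := htl x hx
            exact Or.inl ((pvMem_frontierB n board' x).2
              ⟨hxb, cell, (PySem.Dict.mem_keys_insert board cell cell k).2 (Or.inl rfl), hpn⟩)
        rw [IH board' _ hnd2 inv2 inv3]
        -- the restored set after backtracking
        have hnd3 : (PySem.Set.add (t.foldl PySem.Set.discard
            (PySem.Set.discard pps cell ++ t)) cell).Nodup :=
          PySem.Set.nodup_add _ _ (pvNodup_discardFold _ _ hnd2)
        have hmem3 : ∀ x, x ∈ PySem.Set.add (t.foldl PySem.Set.discard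
            (PySem.Set.discard pps cell ++ t)) cell ↔ x ∈ pps0 := by
          intro x
          rw [PySem.Set.mem_add, pvMem_discardFold]
          constructor
          · rintro (⟨hx1, hx2⟩ | rfl)
            · rcases List.mem_append.1 hx1 with hx1 | hx1
              · exact (hmem x).1 ((PySem.Set.mem_discard _ _ _).1 hx1).1
              · exact absurd hx1 hx2
            · exact hcell0
          · intro hx0
            by_cases hxe : x = cell
            · exact Or.inr hxe
            · have hx1 : x ∈ PySem.Set.discard pps cell :=
                (PySem.Set.mem_discard _ _ _).2 ⟨(hmem x).2 hx0, hxe⟩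
              exact Or.inl ⟨List.mem_append.2 (Or.inl hx1), hdisj x hx1⟩
        exact ihsnap hsnap' _ _ hnd3 hmem3
      · rw [if_neg hsum, if_neg hsum]
        exact ihsnap hsnap' pps best hnd hmem

-- main induction on fuel
lemma pvBacktrack_eq : ∀ (fuel : Nat) (n : Int) (board : PySem.Dict (Int × Int) Int)
    (pps : PySem.Set (Int × Int)) (k : Int),
    pps.Nodup →
    (∀ x ∈ pvFrontierB n board, x ∈ pps) →
    (∀ x ∈ pps, x ∈ pvFrontierB n board ∨ board.contains x = true) →
    pvBacktrackA fuel n board pps k = pvBacktrackB fuel n board k := by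
  intro fuel
  induction fuel with
  | zero => intro n board pps k _ _ _; rfl
  | succ fuel ih =>
    intro n board pps k hnd hfr hsub
    rw [pvBacktrackA, pvBacktrackB]
    rw [pvLoop_eq fuel n k board (fun b p a1 a2 a3 => ih n b p (k + 1) a1 a2 a3)
      pps hfr hsub pps (fun x hx => hx) pps (k - 1) hnd (fun x => Iff.rfl)]
    -- the filtered snapshot is a permutation of the recomputed frontier
    have hperm : (pps.filter (fun c => !board.contains c)).Perm (pvFrontierB n board) := by
      rw [List.perm_ext_iff_of_nodup (List.Nodup.filter _ hnd) (pvNodup_frontierB n board)]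
      intro x
      rw [List.mem_filter, pvMem_frontierB]
      constructor
      · rintro ⟨hx1, hx2⟩
        simp only [Bool.not_eq_true'] at hx2
        rcases hsub x hx1 with hfx | hcx
        · exact (pvMem_frontierB n board x).1 hfx
        · rw [hcx] at hx2; cases hx2
      · intro hx
        refine ⟨hfr x ((pvMem_frontierB n board x).2 hx), ?_⟩
        simp [hx.1]
    exact hperm.foldl_eq' (fun x _ y _ z => by
      split_ifs <;> simp [max_right_comm]) (k - 1)

-- A's initialisation: the board component is B's board
lemma pvInit_board (n : Int) (ones : List (Int × Int)) :
    ∀ (d : PySem.Dict (Int × Int) Int) (s : PySem.Set (Int × Int)),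
    (ones.foldl
      (fun (st : PySem.Dict (Int × Int) Int × PySem.Set (Int × Int)) pos =>
        let board := st.1.insert pos 1
        (board, (pvNeighborsA n pos.1 pos.2).foldl (fun s nb =>
            if board.contains nb then s else PySem.Set.add s nb) st.2)) (d, s)).1
      = ones.foldl (fun d pos => d.insert pos 1) d := by
  induction ones with
  | nil => intro d s; rfl
  | cons hd tl ih => intro d s; exact ih _ _

-- A's initialisation establishes the invariant
lemma pvInit_inv (n : Int) (ones : List (Int × Int)) :
    ∀ (d : PySem.Dict (Int × Int) Int) (s : PySem.Set (Int × Int)),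
    s.Nodup → (∀ x ∈ pvFrontierB n d, x ∈ s) →
    (∀ x ∈ s, x ∈ pvFrontierB n d ∨ d.contains x = true) →
    (((ones.foldl
      (fun (st : PySem.Dict (Int × Int) Int × PySem.Set (Int × Int)) pos =>
        let board := st.1.insert pos 1
        (board, (pvNeighborsA n pos.1 pos.2).foldl (fun s nb =>
            if board.contains nb then s else PySem.Set.add s nb) st.2)) (d, s)).2).Nodup
      ∧ (∀ x ∈ pvFrontierB n (ones.foldl (fun d pos => d.insert pos 1) d),
          x ∈ (ones.foldl
            (fun (st : PySem.Dict (Int × Int) Int × PySem.Set (Int × Int)) pos =>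
              let board := st.1.insert pos 1
              (board, (pvNeighborsA n pos.1 pos.2).foldl (fun s nb =>
                  if board.contains nb then s else PySem.Set.add s nb) st.2)) (d, s)).2)
      ∧ (∀ x ∈ (ones.foldl
            (fun (st : PySem.Dict (Int × Int) Int × PySem.Set (Int × Int)) pos =>
              let board := st.1.insert pos 1
              (board, (pvNeighborsA n pos.1 pos.2).foldl (fun s nb =>
                  if board.contains nb then s else PySem.Set.add s nb) st.2)) (d, s)).2,
          x ∈ pvFrontierB n (ones.foldl (fun d pos => d.insert pos 1) d)
            ∨ (ones.foldl (fun d pos => d.insert pos 1) d).contains x = true)) := by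
  induction ones with
  | nil =>
    intro d s h1 h2 h3
    exact ⟨h1, h2, h3⟩
  | cons pos tl ih =>
    intro d s h1 h2 h3
    simp only [List.foldl_cons]
    set d' := d.insert pos 1 with hd'
    refine ih d' _ (pvNodup_addFold _ _ _ h1) ?_ ?_
    · -- frontier of d' is contained in the grown set
      intro x hx
      obtain ⟨hxb, p, hpk, hpn⟩ := (pvMem_frontierB n d' x).1 hx
      rw [pvMem_addFold]
      rcases (PySem.Dict.mem_keys_insert d pos p 1).1 hpk with rfl | hpk
      · exact Or.inr ⟨hpn, hxb⟩
      · have hxbc : (x == pos || d.contains x) = false := by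
          rw [← PySem.Dict.contains_insert d pos x 1]; exact hxb
        have hxb0 : d.contains x = false := (Bool.or_eq_false_iff.1 hxbc).2
        exact Or.inl (h2 x ((pvMem_frontierB n d x).2 ⟨hxb0, p, hpk, hpn⟩))
    · -- the grown set is frontier-or-stone for d'
      intro x hx
      rw [pvMem_addFold] at hx
      rcases hx with hx | ⟨hpn, hxb⟩
      · rcases h3 x hx with hfx | hcx
        · by_cases hxb' : d'.contains x = true
          · exact Or.inr hxb'
          · simp only [Bool.not_eq_true] at hxb'
            obtain ⟨hxb0, p, hpk, hpn⟩ := (pvMem_frontierB n d x).1 hfx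
            exact Or.inl ((pvMem_frontierB n d' x).2
              ⟨hxb', p, (PySem.Dict.mem_keys_insert d pos p 1).2 (Or.inr hpk), hpn⟩)
        · refine Or.inr ?_
          rw [PySem.Dict.contains_insert d pos x 1, hcx]
          simp
      · exact Or.inl ((pvMem_frontierB n d' x).2
          ⟨hxb, pos, (PySem.Dict.mem_keys_insert d pos pos 1).2 (Or.inl rfl), hpn⟩)

-- ===== VERDICT (by name: the statement is the Claim_ definition above) =====
theorem stepping_stones_spec : Claim_equal_stepping_stones := by
  intro n ones _
  have hb := pvInit_board n ones PySem.Dict.empty PySem.Set.empty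
  have hfr0 : ∀ x ∈ pvFrontierB n (PySem.Dict.empty : PySem.Dict (Int × Int) Int),
      x ∈ (PySem.Set.empty : PySem.Set (Int × Int)) := by
    intro x hx
    rw [pvMem_frontierB] at hx
    rcases hx with ⟨-, p, hp, -⟩
    simp [PySem.Dict.keys_empty] at hp
  have hsub0 : ∀ x ∈ (PySem.Set.empty : PySem.Set (Int × Int)),
      x ∈ pvFrontierB n (PySem.Dict.empty : PySem.Dict (Int × Int) Int)
        ∨ (PySem.Dict.empty : PySem.Dict (Int × Int) Int).contains x = true := by
    intro x hx
    simp [PySem.Set.empty] at hx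
  obtain ⟨hnd, hfr, hsub⟩ := pvInit_inv n ones PySem.Dict.empty PySem.Set.empty
    List.nodup_nil hfr0 hsub0
  unfold Spec_stepping_stones stepping_stones stepping_stones_alt
  simp only []
  rw [hb]
  exact pvBacktrack_eq _ n _ _ 2 hnd hfr hsub
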